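-- pv_equiv track=rewrite | github.com/AsokTamang/Leetcode-DSA | basics/revision.py | brutesubarraymini
-- ===== SOURCE A (Python) =====
-- def brutesubarraymini(arr):
--     n=len(arr)
--     total = 0
--     for i in range(n):
--         mini=arr[i]
--         for j in range(i,n):
--             mini=min(mini,arr[j])
--             total+=mini
--     return total
-- ===== SOURCE B (Python) =====
-- def brutesubarraymini(arr):
--     # Monotonic stack of (value, count) runs compressing the minima of all
--     # subarrays ending at the current index; s = their sum, added per step.
--     total = 0
--     s = 0
--     stack = []  # nonincreasing values from top (end) to bottom
--     for x in arr:
--         c = 1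
--         while stack and stack[-1][0] >= x:
--             v, k = stack.pop()
--             s -= v * k
--             c += k
--         stack.append((x, c))
--         s += x * c
--         total += s
--     return total
-- ===== Notes on version B (the rewrite author's own statement) =====
-- stated objective: faster
-- what changed: Replaces the nested start/end index loops recomputing running minima with a single left-to-right pass maintaining a monotonic stack of (value,count) runs that compresses the minima of all subarrays ending at the current position.
import Mathlib
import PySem

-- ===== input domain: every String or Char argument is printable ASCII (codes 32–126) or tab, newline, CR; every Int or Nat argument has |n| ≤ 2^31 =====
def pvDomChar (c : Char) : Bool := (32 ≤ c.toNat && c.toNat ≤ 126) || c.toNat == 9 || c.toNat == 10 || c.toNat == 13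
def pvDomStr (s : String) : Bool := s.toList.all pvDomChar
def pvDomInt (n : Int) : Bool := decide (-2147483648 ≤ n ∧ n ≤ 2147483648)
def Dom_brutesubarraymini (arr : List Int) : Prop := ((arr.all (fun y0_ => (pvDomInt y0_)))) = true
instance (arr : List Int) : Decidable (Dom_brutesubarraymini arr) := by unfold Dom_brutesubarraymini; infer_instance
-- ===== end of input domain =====

-- B replaces A's nested index loops by a one-pass monotonic (value,count)-stack; objective: faster (asymptotic).


-- ===== PORT A =====
def brutesubarraymini (arr : List Int) : Int :=
  let n : Int := arr.length
  (PySem.List.pyRange 0 n 1).foldl (fun total i =>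
    let mini := PySem.List.pyGetD arr i 0
    ((PySem.List.pyRange i n 1).foldl
      (fun (st : Int × Int) j =>
        let mini := min st.1 (PySem.List.pyGetD arr j 0)
        (mini, st.2 + mini)) (mini, total)).2) 0

-- ===== PORT B =====
-- the inner `while stack and stack[-1][0] >= x` loop of Source B (stack top at head)
def popLoop (x : Int) : List (Int × Int) → Int → Int → (List (Int × Int) × Int × Int)
  | [], s, c => ([], s, c)
  | (v, k) :: rest, s, c =>
      if x ≤ v then popLoop x rest (s - v * k) (c + k)
      else ((v, k) :: rest, s, c)

def brutesubarraymini_alt (arr : List Int) : Int :=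
  (arr.foldl (fun (st : List (Int × Int) × Int × Int) x =>
      let r := popLoop x st.1 st.2.1 1
      ((x, r.2.2) :: r.1, r.2.1 + x * r.2.2, st.2.2 + (r.2.1 + x * r.2.2)))
    ([], 0, 0)).2.2

-- ===== PRECONDITION & SPEC =====
def Spec_brutesubarraymini (arr : List Int) (out : Int) : Prop := out = brutesubarraymini_alt arr
instance (arr : List Int) (out : Int) : Decidable (Spec_brutesubarraymini arr out) := by unfold Spec_brutesubarraymini; infer_instance

-- ===== CLAIM (what is proved, stated in full; the proofs are below) =====
def Claim_equal_brutesubarraymini : Prop := ∀ (arr : List Int), Dom_brutesubarraymini arr → Spec_brutesubarraymini arr (brutesubarraymini arr)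

-- ===== LEMMAS AND PROOFS =====

-- sum of the running minima of l started at m (the totals A's inner loop adds)
def pm (m : Int) : List Int → Int
  | [] => 0
  | y :: ys => min m y + pm (min m y) ys

-- reference value: sum over all start positions of the running-minima sums
def spec : List Int → Int
  | [] => 0
  | x :: xs => pm x (x :: xs) + spec xs

-- the list a (value,count) stack compresses: minima of all subarrays ending at the current position, newest first
def decomp (st : List (Int × Int)) : List Int :=
  st.flatMap (fun p => List.replicate p.2.toNat p.1)

lemma inner_fold (l : List Int) : ∀ (m t : Int),
    l.foldl (fun (st : Int × Int) y => (min st.1 y, st.2 + min st.1 y)) (m, t)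
      = (l.foldl min m, t + pm m l) := by
  induction l with
  | nil => intro m t; simp [pm]
  | cons y ys ih => intro m t; simp [pm, ih (min m y) (t + min m y), add_assoc]

lemma outer_fold (arr : List Int) : ∀ (n i : Nat) (t : Int), arr.length - i = n → i ≤ arr.length →
    (PySem.List.pyRange (i : Int) (arr.length : Int) 1).foldl
      (fun total idx =>
        let mini := PySem.List.pyGetD arr idx 0
        ((PySem.List.pyRange idx (arr.length : Int) 1).foldl
          (fun (st : Int × Int) j =>
            let mini := min st.1 (PySem.List.pyGetD arr j 0)
            (mini, st.2 + mini)) (mini, total)).2) t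
      = t + spec (arr.drop i) := by
  intro n
  induction n with
  | zero =>
    intro i t h hle
    have hi : i = arr.length := by omega
    subst hi
    rw [PySem.List.pyRange_one_eq_nil (le_refl _)]
    simp [spec]
  | succ n ih =>
    intro i t h hle
    have hlt : i < arr.length := by omega
    rw [PySem.List.pyRange_one_cons (by exact_mod_cast hlt)]
    simp only [List.foldl_cons]
    have hinner := PySem.List.foldl_pyRange_pyGetD' arr (0 : Int)
      (fun (st : Int × Int) v => (min st.1 v, st.2 + min st.1 v))
      ((PySem.List.pyGetD arr (i : Int) 0), t) (a := (i : Int)) (by positivity)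
    have step :
        ((PySem.List.pyRange (i : Int) (arr.length : Int) 1).foldl
          (fun (st : Int × Int) j =>
            let mini := min st.1 (PySem.List.pyGetD arr j 0)
            (mini, st.2 + mini)) ((PySem.List.pyGetD arr (i : Int) 0), t)).2
        = t + pm (arr.getD i 0) (arr.drop i) := by
      rw [hinner]
      rw [inner_fold]
      simp
    rw [step]
    have hcast : (i : Int) + 1 = ((i + 1 : Nat) : Int) := by push_cast; ring
    rw [hcast, ih (i + 1) _ (by omega) (by omega)]
    have hdrop : arr.drop i = arr[i] :: arr.drop (i + 1) := List.drop_eq_getElem_cons hlt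
    have hgetD : arr.getD i 0 = arr[i] := by rw [List.getD_eq_getElem _ _ hlt]
    rw [hdrop, hgetD, spec]
    rw [← hdrop]
    ring

lemma A_eq_spec (arr : List Int) : brutesubarraymini arr = spec arr := by
  have h := outer_fold arr arr.length 0 0 (by omega) (Nat.zero_le _)
  simpa using h

lemma mach_total (l : List Int) : ∀ (E : List Int) (t : Int),
    (l.foldl (fun (st : List Int × Int) x =>
        (x :: st.1.map (fun m => min m x),
         st.2 + (x :: st.1.map (fun m => min m x)).sum)) (E, t)).2
      = t + (E.map (fun m => pm m l)).sum + spec l := by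
  induction l with
  | nil => intro E t; simp [spec, pm]
  | cons x xs ih =>
    intro E t
    simp only [List.foldl_cons]
    rw [ih]
    simp only [spec, pm, List.map_cons, List.map_map, Function.comp_def, List.sum_cons,
      min_self, PySem.List.sum_map_add_int]
    ring

lemma mem_decomp {m : Int} {st : List (Int × Int)} (h : m ∈ decomp st) :
    ∃ p ∈ st, m = p.1 := by
  simp only [decomp, List.mem_flatMap] at h
  obtain ⟨p, hp, hm⟩ := h
  exact ⟨p, hp, List.eq_of_mem_replicate hm⟩

lemma pop_spec (x : Int) : ∀ (st : List (Int × Int)) (s c : Int),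
    (∀ p ∈ st, 1 ≤ p.2) → (st.map Prod.fst).Pairwise (fun a b => b ≤ a) →
    (∀ p ∈ (popLoop x st s c).1, 1 ≤ p.2) ∧
    ((popLoop x st s c).1.map Prod.fst).Pairwise (fun a b => b ≤ a) ∧
    (∀ p ∈ (popLoop x st s c).1, p.1 < x) ∧
    c ≤ (popLoop x st s c).2.2 ∧
    (decomp st).map (fun m => min m x)
      = List.replicate ((popLoop x st s c).2.2 - c).toNat x ++ decomp (popLoop x st s c).1 ∧
    (popLoop x st s c).2.1 = s + (decomp (popLoop x st s c).1).sum - (decomp st).sum := by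
  intro st
  induction st with
  | nil =>
    intro s c _ _
    refine ⟨by simp [popLoop], by simp [popLoop], by simp [popLoop], le_refl _, ?_, ?_⟩
    · simp [popLoop, decomp]
    · simp [popLoop, decomp]
  | cons p rest ih =>
    intro s c hcnt hpw
    obtain ⟨v, k⟩ := p
    have hk : (1:Int) ≤ k := hcnt (v, k) (by simp)
    have hcnt' : ∀ q ∈ rest, 1 ≤ q.2 := fun q hq => hcnt q (by simp [hq])
    have hpw' : (rest.map Prod.fst).Pairwise (fun a b => b ≤ a) := by
      simpa using hpw.sublist ((List.sublist_cons_self _ _).map _)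
    by_cases hx : x ≤ v
    · have heq : popLoop x ((v, k) :: rest) s c = popLoop x rest (s - v * k) (c + k) := by
        simp [popLoop, hx]
      obtain ⟨i1, i2, i3, i4, i5, i6⟩ := ih (s - v * k) (c + k) hcnt' hpw'
      rw [heq]
      refine ⟨i1, i2, i3, by omega, ?_, ?_⟩
      · have hdec : decomp ((v, k) :: rest) = List.replicate k.toNat v ++ decomp rest := by
          simp [decomp]
        rw [hdec, List.map_append, i5, List.map_replicate]
        rw [min_eq_right hx]
        rw [← List.append_assoc, ← List.replicate_add]
        congr 2
        omega
      · have hdec : decomp ((v, k) :: rest) = List.replicate k.toNat v ++ decomp rest := by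
          simp [decomp]
        rw [i6, hdec]
        simp [List.sum_replicate, mul_comm]
        have hmax : max k 0 = k := by omega
        rw [hmax]; ring
    · have heq : popLoop x ((v, k) :: rest) s c = ((v, k) :: rest, s, c) := by
        simp [popLoop, hx]
      rw [heq]
      have hvx : v < x := by omega
      have hlt : ∀ q ∈ (v, k) :: rest, q.1 < x := by
        intro q hq
        rcases List.mem_cons.mp hq with h | h
        · subst h; exact hvx
        · have : q.1 ≤ v := by
            have := List.rel_of_pairwise_cons hpw (List.mem_map_of_mem h)
            simpa using this
          omega
      refine ⟨hcnt, hpw, hlt, le_refl _, ?_, by simp⟩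
      have : ∀ m ∈ decomp ((v, k) :: rest), m ≤ x := by
        intro m hm
        obtain ⟨q, hq, rfl⟩ := mem_decomp hm
        exact le_of_lt (hlt q hq)
      simp only [sub_self, Int.toNat_zero, List.replicate_zero, List.nil_append]
      exact List.map_congr_left (fun m hm => min_eq_left (this m hm)) |>.trans (List.map_id _)

lemma B_sim (l : List Int) : ∀ (st : List (Int × Int)) (s t : Int),
    (∀ p ∈ st, 1 ≤ p.2) → ((st.map Prod.fst).Pairwise (fun a b => b ≤ a)) →
    s = (decomp st).sum →
    (l.foldl (fun (st : List (Int × Int) × Int × Int) x =>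
        let r := popLoop x st.1 st.2.1 1
        ((x, r.2.2) :: r.1, r.2.1 + x * r.2.2, st.2.2 + (r.2.1 + x * r.2.2)))
      (st, s, t)).2.2
    = (l.foldl (fun (st : List Int × Int) x =>
        (x :: st.1.map (fun m => min m x),
         st.2 + (x :: st.1.map (fun m => min m x)).sum)) (decomp st, t)).2 := by
  induction l with
  | nil => intro st s t _ _ _; rfl
  | cons x xs ih =>
    intro st s t hcnt hpw hs
    obtain ⟨i1, i2, i3, i4, i5, i6⟩ := pop_spec x st s 1 hcnt hpw
    set r := popLoop x st s 1 with hr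
    have hdec_new : decomp ((x, r.2.2) :: r.1) = x :: (decomp st).map (fun m => min m x) := by
      have h0 : decomp ((x, r.2.2) :: r.1) = List.replicate r.2.2.toNat x ++ decomp r.1 := by
        simp [decomp]
      have h1 : r.2.2.toNat = (r.2.2 - 1).toNat + 1 := by omega
      rw [h0, h1, List.replicate_succ, i5, List.cons_append]
    have hsum : r.2.1 + x * r.2.2 = (x :: (decomp st).map (fun m => min m x)).sum := by
      have h1 : ((decomp st).map (fun m => min m x)).sum
          = x * (r.2.2 - 1) + (decomp r.1).sum := by
        rw [i5]
        simp [List.sum_replicate, mul_comm]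
        omega
      rw [List.sum_cons, h1, i6, ← hs]
      ring
    have hcnt2 : ∀ p ∈ (x, r.2.2) :: r.1, 1 ≤ p.2 := by
      intro p hp
      rcases List.mem_cons.mp hp with h | h
      · subst h; simpa using i4
      · exact i1 p h
    have hpw2 : (((x, r.2.2) :: r.1).map Prod.fst).Pairwise (fun a b => b ≤ a) := by
      simp only [List.map_cons]
      refine List.Pairwise.cons ?_ i2
      intro b hb
      obtain ⟨q, hq, rfl⟩ := List.mem_map.mp hb
      exact le_of_lt (i3 q hq)
    have hs2 : r.2.1 + x * r.2.2 = (decomp ((x, r.2.2) :: r.1)).sum := by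
      rw [hdec_new, ← hsum]
    simp only [List.foldl_cons]
    rw [ih _ _ _ hcnt2 hpw2 hs2, hdec_new, hsum]

lemma B_eq_spec (arr : List Int) : brutesubarraymini_alt arr = spec arr := by
  unfold brutesubarraymini_alt
  rw [B_sim arr [] 0 0 (by simp) (by simp) (by simp [decomp])]
  have h := mach_total arr [] 0
  simp only [decomp, List.flatMap_nil] at *
  rw [h]
  simp

-- ===== VERDICT (by name: the statement is the Claim_ definition above) =====
theorem brutesubarraymini_spec : Claim_equal_brutesubarraymini := by
  intro arr _
  unfold Spec_brutesubarraymini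
  rw [A_eq_spec, B_eq_spec]
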